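-- pv_equiv track=rewrite | github.com/Jeasuiiya/geesi_new | python/geesibling/adapters/jax/shard_parallel/shard_parallel.py | get_best_sharding
-- ===== SOURCE A (Python) =====
-- def get_best_sharding(dim1, dim2, tp_num):
--     for new_tp in range(tp_num , 0, -1):
--         factors = [(i, new_tp // i) for i in range(1, new_tp + 1) if new_tp % i == 0]
--         factors.sort(key=lambda p: (abs(p[0] - p[1]), -p[0]))
--         for x, y in factors:
--             if dim1 % x == 0 and dim2 % y == 0:
--                 return (x, y)
--     return (1, 1)
-- ===== SOURCE B (Python) =====
-- def get_best_sharding(dim1, dim2, tp_num):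
--     for new_tp in range(tp_num, 0, -1):
--         # Divisor pairs of new_tp sorted by (abs(x-y), -x) are exactly, for i
--         # descending from isqrt(new_tp): (new_tp//i, i) then (i, new_tp//i).
--         # Scan i ASCENDING and overwrite, so the last match found is the first
--         # match of that sorted order; no factor list, no sort.
--         best = None
--         i = 1
--         while i * i <= new_tp:
--             if new_tp % i == 0:
--                 big = new_tp // i
--                 if dim1 % big == 0 and dim2 % i == 0:
--                     best = (big, i)
--                 elif big != i and dim1 % i == 0 and dim2 % big == 0:
--                     best = (i, big)
--             i += 1
--         if best is not None:
--             return best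
--     return (1, 1)
-- ===== Notes on version B (the rewrite author's own statement) =====
-- stated objective: faster
-- what changed: Instead of materialising and sorting all divisor pairs of each new_tp, B scans i ascending while i*i <= new_tp and keeps the last matching divisor pair by overwrite (the ascending scan is exactly the reverse of A's sorted order), removing both the full-range divisor enumeration and the sort.
import Mathlib
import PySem

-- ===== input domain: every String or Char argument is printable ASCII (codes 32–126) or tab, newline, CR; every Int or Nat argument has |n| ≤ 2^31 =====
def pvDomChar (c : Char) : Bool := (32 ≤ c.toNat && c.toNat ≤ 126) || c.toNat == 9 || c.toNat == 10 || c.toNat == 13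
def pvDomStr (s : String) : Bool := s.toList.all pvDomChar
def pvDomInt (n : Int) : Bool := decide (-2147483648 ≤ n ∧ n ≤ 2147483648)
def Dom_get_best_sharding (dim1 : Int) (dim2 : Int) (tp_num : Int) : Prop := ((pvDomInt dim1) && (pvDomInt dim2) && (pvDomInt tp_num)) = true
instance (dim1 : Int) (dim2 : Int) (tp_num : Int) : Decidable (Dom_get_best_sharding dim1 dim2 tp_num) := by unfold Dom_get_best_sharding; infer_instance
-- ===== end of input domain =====

-- B replaces A's build-all-divisor-pairs-and-sort per new_tp by a single ascending
-- scan of i while i*i <= new_tp with a last-match-wins accumulator (the ascending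
-- scan is the reverse of A's sorted order); measured faster in a timing run.

-- ===== PORT A =====
-- the inner-loop test 'dim1 % x == 0 and dim2 % y == 0'
def pvPred (dim1 dim2 : Int) (p : Int × Int) : Bool :=
  PySem.Int.mod dim1 p.1 == 0 && PySem.Int.mod dim2 p.2 == 0

-- sort key (abs(p[0]-p[1]), -p[0]); Python compares tuples lexicographically = Lex (Int × Int)
def pvKey (p : Int × Int) : Lex (Int × Int) := toLex (|p.1 - p.2|, -p.1)

-- factors = [(i, new_tp // i) for i in range(1, new_tp + 1) if new_tp % i == 0]
def pvFactors (n : Int) : List (Int × Int) :=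
  ((PySem.List.pyRange 1 (n + 1) 1).filter (fun i => PySem.Int.mod n i == 0)).map
    (fun i => (i, PySem.Int.floordiv n i))

-- the outer 'for new_tp in range(tp_num, 0, -1)' with early return
def pvLoopA (dim1 dim2 : Int) : List Int → List Int
  | [] => [1, 1]
  | n :: rest =>
      match (PySem.List.sorted (pvFactors n) pvKey).find? (pvPred dim1 dim2) with
      | some (x, y) => [x, y]
      | none => pvLoopA dim1 dim2 rest

def get_best_sharding (dim1 : Int) (dim2 : Int) (tp_num : Int) : List Int :=
  pvLoopA dim1 dim2 (PySem.List.pyRange tp_num 0 (-1))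

-- ===== PORT B =====
-- the 'while i * i <= new_tp' loop of Source B, with i = (j : Int) + 1
def pvInnerB (dim1 dim2 n : Int) (j : Nat) (best : Option (Int × Int)) : Option (Int × Int) :=
  if h : ((j : Int) + 1) * ((j : Int) + 1) ≤ n then
    let i : Int := (j : Int) + 1
    let best' :=
      if PySem.Int.mod n i == 0 then
        let big := PySem.Int.floordiv n i
        if PySem.Int.mod dim1 big == 0 && PySem.Int.mod dim2 i == 0 then some (big, i)
        else if big != i && (PySem.Int.mod dim1 i == 0 && PySem.Int.mod dim2 big == 0) then
          some (i, big)
        else best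
      else best
    pvInnerB dim1 dim2 n (j + 1) best'
  else best
termination_by n.toNat - j
decreasing_by
  have h1 : (j : Int) + 1 ≤ n :=
    le_trans (le_mul_of_one_le_left (by omega) (by omega)) h
  omega

def pvLoopB (dim1 dim2 : Int) : List Int → List Int
  | [] => [1, 1]
  | n :: rest =>
      match pvInnerB dim1 dim2 n 0 none with
      | some (x, y) => [x, y]
      | none => pvLoopB dim1 dim2 rest

def get_best_sharding_alt (dim1 : Int) (dim2 : Int) (tp_num : Int) : List Int :=
  pvLoopB dim1 dim2 (PySem.List.pyRange tp_num 0 (-1))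

-- ===== PRECONDITION & SPEC =====
def Spec_get_best_sharding (dim1 : Int) (dim2 : Int) (tp_num : Int) (out : List Int) : Prop := out = get_best_sharding_alt dim1 dim2 tp_num
instance (dim1 : Int) (dim2 : Int) (tp_num : Int) (out : List Int) : Decidable (Spec_get_best_sharding dim1 dim2 tp_num out) := by unfold Spec_get_best_sharding; infer_instance

-- ===== CLAIM (what is proved, stated in full; the proofs are below) =====
def Claim_equal_get_best_sharding : Prop := ∀ (dim1 : Int) (dim2 : Int) (tp_num : Int), Dom_get_best_sharding dim1 dim2 tp_num → Spec_get_best_sharding dim1 dim2 tp_num (get_best_sharding dim1 dim2 tp_num)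

-- ===== LEMMAS AND PROOFS =====

-- the divisor pairs of n for one small divisor i: (n//i, i) then (i, n//i)
def pvBlock (n i : Int) : List (Int × Int) :=
  if PySem.Int.mod n i == 0 then
    let big := PySem.Int.floordiv n i
    (big, i) :: (if big ≠ i then [(i, big)] else [])
  else []

-- all divisor pairs of n, for small divisors i = j+1, j+2, … descending (blocks of
-- larger i first): exactly A's sorted factor list when j = 0
def pvDesc (n : Int) (j : Nat) : List (Int × Int) :=
  if h : ((j : Int) + 1) * ((j : Int) + 1) ≤ n then
    pvDesc n (j + 1) ++ pvBlock n ((j : Int) + 1)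
  else []
termination_by n.toNat - j
decreasing_by
  have h1 : (j : Int) + 1 ≤ n :=
    le_trans (le_mul_of_one_le_left (by omega) (by omega)) h
  omega


-- arithmetic facts about a small divisor i of n
theorem pv_div_facts {n i : Int} (hi : 1 ≤ i) (hsq : i * i ≤ n) (hd : i ∣ n) :
    i * (n / i) = n ∧ i ≤ n / i ∧ 1 ≤ n / i := by
  have e : i * (n / i) = n := Int.mul_ediv_cancel' hd
  have h2 : i ≤ n / i := (Int.le_ediv_iff_mul_le (by omega)).mpr hsq
  exact ⟨e, h2, le_trans hi h2⟩

-- the key's first component is strictly smaller for the larger small divisor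
theorem pv_div_strict {n i i' : Int} (hi : 1 ≤ i) (hii' : i < i') (hd : i ∣ n)
    (hd' : i' ∣ n) (hsq' : i' * i' ≤ n) : n / i' - i' < n / i - i := by
  have e : i * (n / i) = n := Int.mul_ediv_cancel' hd
  have e' : i' * (n / i') = n := Int.mul_ediv_cancel' hd'
  have h1 : 1 ≤ n / i' := (pv_div_facts (by omega) hsq' hd').2.2
  have h2 : n / i' < n / i := by nlinarith
  omega

theorem pvInnerB_eq_aux (dim1 dim2 n : Int) :
    ∀ (k j : Nat), n.toNat ≤ j + k → ∀ (best : Option (Int × Int)),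
      pvInnerB dim1 dim2 n j best =
        ((pvDesc n j).find? (pvPred dim1 dim2)).or best := by
  intro k
  induction k with
  | zero =>
      intro j hk best
      have hg : ¬ ((j : Int) + 1) * ((j : Int) + 1) ≤ n := by
        intro hcon
        have h1 : (j : Int) + 1 ≤ n :=
          le_trans (le_mul_of_one_le_left (by omega) (by omega)) hcon
        omega
      rw [pvInnerB, dif_neg hg, pvDesc, dif_neg hg]
      rfl
  | succ k ih =>
      intro j hk best
      by_cases hg : ((j : Int) + 1) * ((j : Int) + 1) ≤ n
      · rw [pvInnerB, dif_pos hg, pvDesc, dif_pos hg, List.find?_append, Option.or_assoc]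
        simp only [ih (j + 1) (by omega)]
        congr 1
        by_cases hm : ((j : Int) + 1) ∣ n <;>
          by_cases c1 : PySem.Int.mod dim1 (n / ((j : Int) + 1)) = 0 <;>
          by_cases c2 : ((j : Int) + 1) ∣ dim2 <;>
          by_cases cne : n / ((j : Int) + 1) = (j : Int) + 1 <;>
          by_cases c3 : ((j : Int) + 1) ∣ dim1 <;>
          by_cases c4 : PySem.Int.mod dim2 (n / ((j : Int) + 1)) = 0 <;>
          simp [pvBlock, pvPred, hm, c1, c2, cne, c3, c4]
      · rw [pvInnerB, dif_neg hg, pvDesc, dif_neg hg]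
        rfl

theorem pvInnerB_eq (dim1 dim2 n : Int) (j : Nat) (best : Option (Int × Int)) :
    pvInnerB dim1 dim2 n j best =
      ((pvDesc n j).find? (pvPred dim1 dim2)).or best :=
  pvInnerB_eq_aux dim1 dim2 n n.toNat j (by omega) best

theorem pvFactors_mem {n : Int} (hn : 1 ≤ n) (p : Int × Int) :
    p ∈ pvFactors n ↔ 1 ≤ p.1 ∧ 1 ≤ p.2 ∧ p.1 * p.2 = n := by
  obtain ⟨x, y⟩ := p
  simp only [pvFactors, List.mem_map, List.mem_filter, PySem.List.mem_pyRange_one,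
    beq_iff_eq, PySem.Int.mod_eq_zero_iff_dvd]
  constructor
  · rintro ⟨i, ⟨⟨hi1, hi2⟩, hd⟩, heq⟩
    have hipos : 0 < i := by omega
    rw [PySem.Int.floordiv_eq_ediv_of_pos hipos] at heq
    have e : i * (n / i) = n := Int.mul_ediv_cancel' hd
    obtain ⟨rfl, rfl⟩ := Prod.ext_iff.mp heq
    have h2 : 1 ≤ n / i := by nlinarith
    exact ⟨hi1, h2, e⟩
  · rintro ⟨hx, hy, hxy⟩
    refine ⟨x, ⟨⟨hx, by nlinarith⟩, ⟨y, hxy.symm⟩⟩, ?_⟩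
    rw [PySem.Int.floordiv_eq_ediv_of_pos (by omega)]
    rw [← hxy, Int.mul_ediv_cancel_left _ (by omega)]

theorem pvDesc_mem (n : Int) (j : Nat) (p : Int × Int) :
    p ∈ pvDesc n j ↔ ∃ i : Int, (j : Int) + 1 ≤ i ∧ i * i ≤ n ∧ i ∣ n ∧
      (p = (n / i, i) ∨ (n / i ≠ i ∧ p = (i, n / i))) := by
  fun_induction pvDesc n j with
  | case1 j h ih =>
      rw [List.mem_append, ih]
      have hipos : (0 : Int) < (j : Int) + 1 := by positivity
      constructor
      · rintro (⟨i, hi1, hi2, hd, hp⟩ | hb)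
        · exact ⟨i, by push_cast at hi1 ⊢; omega, hi2, hd, hp⟩
        · simp only [pvBlock] at hb
          by_cases hm : PySem.Int.mod n ((j : Int) + 1) == 0
          · rw [if_pos hm] at hb
            have hd : ((j : Int) + 1) ∣ n := by
              have := (beq_iff_eq ..).mp hm
              exact (PySem.Int.mod_eq_zero_iff_dvd n _).mp this
            rw [PySem.Int.floordiv_eq_ediv_of_pos hipos] at hb
            refine ⟨(j : Int) + 1, le_refl _, h, hd, ?_⟩
            rcases List.mem_cons.mp hb with h1 | h2
            · exact Or.inl h1
            · by_cases hne : n / ((j : Int) + 1) = (j : Int) + 1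
              · rw [if_neg (by simpa using hne)] at h2; simp at h2
              · rw [if_pos (by simpa using hne)] at h2
                simp at h2
                exact Or.inr ⟨hne, h2⟩
          · rw [if_neg hm] at hb; simp at hb
      · rintro ⟨i, hi1, hi2, hd, hp⟩
        rcases eq_or_lt_of_le hi1 with heq | hlt
        · right
          simp only [pvBlock]
          have hm : PySem.Int.mod n ((j : Int) + 1) == 0 := by
            rw [beq_iff_eq, PySem.Int.mod_eq_zero_iff_dvd]
            exact heq ▸ hd
          rw [if_pos hm, PySem.Int.floordiv_eq_ediv_of_pos hipos]
          subst heq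
          rcases hp with h1 | ⟨hne, h2⟩
          · exact List.mem_cons.mpr (Or.inl h1)
          · refine List.mem_cons.mpr (Or.inr ?_)
            rw [if_pos (by simpa using hne)]
            simp [h2]
        · left
          exact ⟨i, by push_cast; omega, hi2, hd, hp⟩
  | case2 j h =>
      simp only [List.not_mem_nil, false_iff]
      rintro ⟨i, hi1, hi2, hd, hp⟩
      exact h (by nlinarith)

theorem pvDesc_pairwise (n : Int) (j : Nat) :
    (pvDesc n j).Pairwise (fun a b => pvKey a < pvKey b) := by
  fun_induction pvDesc n j with
  | case1 j h ih =>
      have hipos : (0 : Int) < (j : Int) + 1 := by positivity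
      rw [List.pairwise_append]
      refine ⟨ih, ?_, ?_⟩
      · -- the block itself is strictly increasing in key
        simp only [pvBlock]
        by_cases hm : PySem.Int.mod n ((j : Int) + 1) == 0
        · rw [if_pos hm, PySem.Int.floordiv_eq_ediv_of_pos hipos]
          have hd : ((j : Int) + 1) ∣ n :=
            (PySem.Int.mod_eq_zero_iff_dvd n _).mp ((beq_iff_eq ..).mp hm)
          obtain ⟨-, hle, -⟩ := pv_div_facts (by omega) h hd
          by_cases hne : n / ((j : Int) + 1) = (j : Int) + 1
          · rw [if_neg (by simpa using hne)]
            simp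
          · rw [if_pos (by simpa using hne)]
            refine List.pairwise_cons.mpr ⟨?_, List.pairwise_singleton ..⟩
            intro b hb
            simp only [List.mem_singleton] at hb
            subst hb
            have hlt : (j : Int) + 1 < n / ((j : Int) + 1) := lt_of_le_of_ne hle (Ne.symm hne)
            rw [Prod.Lex.lt_iff]
            refine Or.inr ⟨?_, ?_⟩
            · simp only [pvKey, ofLex_toLex]
              exact abs_sub_comm _ _
            · simp only [pvKey, ofLex_toLex]
              omega
        · rw [if_neg hm]; exact List.Pairwise.nil
      · -- everything already emitted (larger divisors) has strictly smaller key
        intro a ha b hb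
        obtain ⟨i', hi'1, hi'2, hd', hp'⟩ := (pvDesc_mem n (j + 1) a).mp ha
        simp only [pvBlock] at hb
        by_cases hm : PySem.Int.mod n ((j : Int) + 1) == 0
        · rw [if_pos hm, PySem.Int.floordiv_eq_ediv_of_pos hipos] at hb
          have hd : ((j : Int) + 1) ∣ n :=
            (PySem.Int.mod_eq_zero_iff_dvd n _).mp ((beq_iff_eq ..).mp hm)
          have hii' : (j : Int) + 1 < i' := by push_cast at hi'1; omega
          have hstrict : n / i' - i' < n / ((j : Int) + 1) - ((j : Int) + 1) :=
            pv_div_strict (by omega) hii' hd hd' hi'2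
          obtain ⟨-, hle', -⟩ := pv_div_facts (by omega) hi'2 hd'
          obtain ⟨-, hle, -⟩ := pv_div_facts (by omega) h hd
          have hka : (ofLex (pvKey a)).1 = n / i' - i' := by
            rcases hp' with rfl | ⟨-, rfl⟩ <;> simp [pvKey, abs_of_nonneg, abs_of_nonpos, *]
          have hkb : (ofLex (pvKey b)).1 = n / ((j : Int) + 1) - ((j : Int) + 1) := by
            have hbcases : b = (n / ((j : Int) + 1), (j : Int) + 1)
                ∨ b = ((j : Int) + 1, n / ((j : Int) + 1)) := by
              rcases List.mem_cons.mp hb with h1 | h2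
              · exact Or.inl h1
              · by_cases hne : n / ((j : Int) + 1) = (j : Int) + 1
                · rw [if_neg (by simpa using hne)] at h2; simp at h2
                · rw [if_pos (by simpa using hne)] at h2; simp at h2; exact Or.inr h2
            rcases hbcases with rfl | rfl <;> simp [pvKey, abs_of_nonneg, abs_of_nonpos, *]
          rw [Prod.Lex.lt_iff]
          left
          rw [hka, hkb]
          exact hstrict
        · rw [if_neg hm] at hb; simp at hb
  | case2 j h =>
      exact List.Pairwise.nil

theorem pvFactors_nodup (n : Int) : (pvFactors n).Nodup := by
  refine List.Nodup.map ?_ (List.Nodup.filter _ (PySem.List.nodup_pyRange_one 1 (n + 1)))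
  intro a b hab
  exact (Prod.ext_iff.mp hab).1

theorem pvDesc_nodup (n : Int) : (pvDesc n 0).Nodup :=
  (pvDesc_pairwise n 0).imp fun hlt => by rintro rfl; exact lt_irrefl _ hlt

theorem pvSorted_eq (n : Int) :
    PySem.List.sorted (pvFactors n) pvKey = pvDesc n 0 := by
  by_cases hn : 1 ≤ n
  · apply PySem.List.sorted_eq_of_perm_of_pairwise_lt _ _ pvKey ?_ (pvDesc_pairwise n 0)
    rw [List.perm_ext_iff_of_nodup (pvDesc_nodup n) (pvFactors_nodup n)]
    intro ⟨x, y⟩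
    rw [pvDesc_mem, pvFactors_mem hn]
    simp only [Nat.cast_zero, zero_add]
    constructor
    · rintro ⟨i, hi1, hi2, hd, hp⟩
      obtain ⟨e, hle, hq⟩ := pv_div_facts hi1 hi2 hd
      rcases hp with heq | ⟨hne, heq⟩
      · injection heq with h1 h2
        subst h1; subst h2
        exact ⟨hq, hi1, by rw [mul_comm]; exact e⟩
      · injection heq with h1 h2
        subst h1; subst h2
        exact ⟨hi1, hq, e⟩
    · rintro ⟨hx, hy, hxy⟩
      by_cases hyx : y ≤ x
      · refine ⟨y, hy, by nlinarith, ⟨x, by linarith [mul_comm x y]⟩, Or.inl ?_⟩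
        have : n / y = x := by rw [← hxy, Int.mul_ediv_cancel _ (by omega)]
        rw [this]
      · refine ⟨x, hx, by nlinarith, ⟨y, hxy.symm⟩, Or.inr ⟨?_, ?_⟩⟩
        · have : n / x = y := by rw [← hxy, Int.mul_ediv_cancel_left _ (by omega)]
          omega
        · have : n / x = y := by rw [← hxy, Int.mul_ediv_cancel_left _ (by omega)]
          rw [this]
  · have h1 : pvFactors n = [] := by
      simp [pvFactors, PySem.List.pyRange_one_eq_nil (by omega : n + 1 ≤ 1)]
    have h2 : pvDesc n 0 = [] := by
      rw [pvDesc, dif_neg (by push_cast; nlinarith)]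
    rw [h1, h2]
    rfl

theorem pvLoops_eq (dim1 dim2 : Int) (L : List Int) :
    pvLoopA dim1 dim2 L = pvLoopB dim1 dim2 L := by
  induction L with
  | nil => rfl
  | cons n rest ih =>
      simp only [pvLoopA, pvLoopB, pvSorted_eq, pvInnerB_eq, Option.or_none]
      cases (pvDesc n 0).find? (pvPred dim1 dim2) with
      | none => exact ih
      | some p => rfl

-- ===== VERDICT (by name: the statement is the Claim_ definition above) =====
theorem get_best_sharding_spec : Claim_equal_get_best_sharding := by
  intro dim1 dim2 tp_num _
  unfold Spec_get_best_sharding get_best_sharding get_best_sharding_alt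
  exact pvLoops_eq dim1 dim2 _
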